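-- pv_equiv track=rewrite | github.com/bigkangaroo123/code_python | moseymakes.py | v_checker
-- ===== SOURCE A (Python) =====
-- def v_checker(v, word):
--     vowels = "aeiouy"
--     counter = 0
--     for char in word:
--         if char in vowels:
--             counter += 1
--         else:
--             counter = 0
--
--         if counter > v:
--             return False
--
--     return True
-- ===== SOURCE B (Python) =====
-- def v_checker(v, word):
--     vowels = "aeiouy"
--     i, n = 0, len(word)
--     while i < n:
--         if word[i] in vowels:
--             j = i
--             while j < n and word[j] in vowels:
--                 j += 1
--             if j - i > v:
--                 return False
--             i = j
--         else:
--             i += 1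
--     return True
-- ===== Notes on version B (the rewrite author's own statement) =====
-- stated objective: alternative
-- what changed: B scans the word run by run, measuring each maximal vowel run at once and comparing its length to v, instead of A's per-character counter re-checked after every character.
-- intended difference: For v < 0 on a non-empty word with no vowels at all, A returns False (its counter=0 check fires even on consonants), while B returns True because no vowel run exceeds the limit; B's value is the intended one for a check that only limits consecutive vowels. — e.g. on v_checker(-1, "b"): A returns false, B returns true
import Mathlib
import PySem

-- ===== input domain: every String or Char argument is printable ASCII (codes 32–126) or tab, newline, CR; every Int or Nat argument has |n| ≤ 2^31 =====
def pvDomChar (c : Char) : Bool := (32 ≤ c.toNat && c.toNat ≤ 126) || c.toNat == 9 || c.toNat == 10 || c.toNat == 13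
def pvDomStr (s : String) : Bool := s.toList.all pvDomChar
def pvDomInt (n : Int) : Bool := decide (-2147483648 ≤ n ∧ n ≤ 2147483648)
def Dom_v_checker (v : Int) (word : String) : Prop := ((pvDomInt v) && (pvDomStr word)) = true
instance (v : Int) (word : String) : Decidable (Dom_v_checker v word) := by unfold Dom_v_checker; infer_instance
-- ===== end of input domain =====

-- B scans the word run by run (each maximal vowel run measured at once) instead of A's
-- per-character counter; alternative decomposition, same cost. On v < 0 with a non-empty
-- all-consonant word the two differ (see D_ below).

-- ===== PORT A =====
def isVowel (c : Char) : Bool := "aeiouy".toList.contains c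

def vCheckLoop (v : Int) : List Char → Int → Bool
  | [], _ => true
  | c :: t, counter =>
    let counter := if isVowel c then counter + 1 else 0
    if counter > v then false else vCheckLoop v t counter

def v_checker (v : Int) (word : String) : Bool := vCheckLoop v word.toList 0

-- ===== PORT B =====
-- inner while loop of Source B: count the leading vowel run, return (run length, rest)
def countRun : List Char → Nat × List Char
  | [] => (0, [])
  | c :: t => if isVowel c then let p := countRun t; (p.1 + 1, p.2) else (0, c :: t)

theorem countRun_eq (l : List Char) :
    countRun l = ((l.takeWhile isVowel).length, l.dropWhile isVowel) := by
  induction l with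
  | nil => rfl
  | cons c t ih =>
    by_cases h : isVowel c = true <;>
      simp [countRun, List.takeWhile, List.dropWhile, h, ih]

-- outer while loop of Source B
def altRuns (v : Int) : List Char → Bool
  | [] => true
  | c :: t =>
    if isVowel c then
      let p := countRun (c :: t)
      if (p.1 : Int) > v then false else altRuns v p.2
    else altRuns v t
termination_by l => l.length
decreasing_by
  · simp only [countRun_eq]
    have : (List.dropWhile isVowel (c :: t)).length ≤ t.length := by
      simpa [List.dropWhile, *] using (List.length_dropWhile_le isVowel t)
    simpa using Nat.lt_succ_of_le this
  · simp

def v_checker_alt (v : Int) (word : String) : Bool := altRuns v word.toList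

-- ===== PRECONDITION & SPEC =====
-- For v < 0 on a non-empty word with no vowels at all, A returns False (its counter=0 check
-- fires even on consonants), while B returns True because no vowel run exceeds the limit;
-- B's value is the intended one for a check that only limits consecutive vowels.
def D_v_checker (v : Int) (word : String) : Prop :=
  v < 0 ∧ word ≠ "" ∧ word.toList.all (fun c => !("aeiouy".toList.contains c)) = true
instance (v : Int) (word : String) : Decidable (D_v_checker v word) := by unfold D_v_checker; infer_instance

def Spec_v_checker (v : Int) (word : String) (out : Bool) : Prop :=
  ¬ D_v_checker v word → out = v_checker_alt v word
instance (v : Int) (word : String) (out : Bool) : Decidable (Spec_v_checker v word out) := by unfold Spec_v_checker; infer_instance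

def pvDiffWitness_v_checker : Int × String := (-1, "b")
def pvDiffWitnessOut_v_checker : Bool × Bool := (false, true)

-- ===== CLAIM (what is proved, stated in full; the proofs are below) =====
def Claim_unchanged_v_checker : Prop := ∀ (v : Int) (word : String), Dom_v_checker v word → Spec_v_checker v word (v_checker v word)
def Claim_changed_v_checker : Prop := Dom_v_checker (pvDiffWitness_v_checker.1) (pvDiffWitness_v_checker.2) ∧ D_v_checker (pvDiffWitness_v_checker.1) (pvDiffWitness_v_checker.2) ∧ v_checker (pvDiffWitness_v_checker.1) (pvDiffWitness_v_checker.2) = pvDiffWitnessOut_v_checker.1 ∧ v_checker_alt (pvDiffWitness_v_checker.1) (pvDiffWitness_v_checker.2) = pvDiffWitnessOut_v_checker.2 ∧ pvDiffWitnessOut_v_checker.1 ≠ pvDiffWitnessOut_v_checker.2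
def Claim_exact_v_checker : Prop := ∀ (v : Int) (word : String), Dom_v_checker v word → D_v_checker v word → v_checker v word ≠ v_checker_alt v word

-- ===== LEMMAS AND PROOFS =====

-- processing one whole vowel run of A's loop at once
theorem vCheckLoop_run (v : Int) (hv : 0 ≤ v) :
    ∀ (l : List Char) (c : Int), 0 ≤ c → c ≤ v →
      vCheckLoop v l c =
        if (c + (l.takeWhile isVowel).length : Int) > v then false
        else vCheckLoop v (l.dropWhile isVowel) 0 := by
  intro l
  induction l with
  | nil =>
    intro c _ hcv
    simp [vCheckLoop, List.takeWhile, List.dropWhile]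
    omega
  | cons x t ih =>
    intro c hc hcv
    by_cases hx : isVowel x = true
    · by_cases h1 : c + 1 > v
      · have hgt : (c + ((List.takeWhile isVowel (x :: t)).length : Int) > v) := by
          simp [List.takeWhile, hx]; omega
        rw [if_pos hgt]
        simp [vCheckLoop, hx, h1]
      · rw [show vCheckLoop v (x :: t) c = vCheckLoop v t (c + 1) from by
            simp [vCheckLoop, hx, h1]]
        rw [ih (c + 1) (by omega) (by omega)]
        simp only [List.takeWhile, List.dropWhile, hx, List.length_cons]
        split_ifs with h2 h3 <;> first | rfl | (exfalso; push_cast at *; omega)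
    · have h0 : ¬ ((0 : Int) > v) := by omega
      have hc0 : ¬ (c + ((List.takeWhile isVowel (x :: t)).length : Int) > v) := by
        simp [List.takeWhile, hx]; omega
      simp only [List.dropWhile, hx, if_neg hc0]
      simp [vCheckLoop, hx, h0]

theorem loop_eq_altRuns (v : Int) (hv : 0 ≤ v) :
    ∀ (n : Nat) (l : List Char), l.length ≤ n → vCheckLoop v l 0 = altRuns v l := by
  intro n
  induction n with
  | zero =>
    intro l hl
    have hnil : l = [] := List.eq_nil_of_length_eq_zero (Nat.le_zero.mp hl)
    subst hnil
    simp [vCheckLoop, altRuns]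
  | succ n ih =>
    intro l hl
    cases l with
    | nil => simp [vCheckLoop, altRuns]
    | cons c t =>
      by_cases hc : isVowel c = true
      · rw [vCheckLoop_run v hv (c :: t) 0 le_rfl hv]
        rw [altRuns]
        simp only [hc, if_true, countRun_eq, zero_add]
        by_cases hgt : (((List.takeWhile isVowel (c :: t)).length : Int) > v)
        · simp [hgt]
        · have hlt : (List.dropWhile isVowel (c :: t)).length ≤ n := by
            have h2 := List.length_dropWhile_le isVowel t
            simp only [List.dropWhile, hc] at *
            simp at hl
            omega
          simp only [hgt, if_neg, not_false_iff]
          exact ih _ hlt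
      · rw [altRuns]
        have h0 : ¬ ((0 : Int) > v) := by omega
        rw [show vCheckLoop v (c :: t) 0 = vCheckLoop v t 0 from by
          simp [vCheckLoop, hc, h0]]
        simp only [hc, if_neg, Bool.false_eq_true, not_false_iff]
        exact ih t (by simpa using Nat.le_of_succ_le_succ hl)

-- A for negative v: any non-empty word fails
theorem loop_neg (v : Int) (hv : v < 0) (l : List Char) :
    vCheckLoop v l 0 = l.isEmpty := by
  cases l with
  | nil => rfl
  | cons c t =>
    by_cases hc : isVowel c = true
    · simp [vCheckLoop, hc]; omega
    · simp [vCheckLoop, hc]; omega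

-- B for negative v: true iff the word has no vowel
theorem altRuns_neg (v : Int) (hv : v < 0) (l : List Char) :
    altRuns v l = l.all (fun c => !isVowel c) := by
  induction l with
  | nil => simp [altRuns]
  | cons c t ih =>
    by_cases hc : isVowel c = true
    · have h1 : ((countRun (c :: t)).1 : Int) > v := by
        simp [countRun, hc]
        omega
      rw [altRuns]
      simp [hc, h1]
    · rw [altRuns]
      simp [hc, ih]

-- ===== VERDICT (by name: the statement is the Claim_ definition above) =====
theorem v_checker_spec : Claim_unchanged_v_checker := by
  intro v word _
  unfold Spec_v_checker v_checker v_checker_alt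
  intro hd
  by_cases hv : v < 0
  · rw [loop_neg v hv, altRuns_neg v hv]
    unfold D_v_checker at hd
    cases l' : word.toList with
    | nil => simp
    | cons c t =>
      have hne : word ≠ "" := by
        intro h; subst h; simp at l'
      have : ¬ (word.toList.all (fun c => !("aeiouy".toList.contains c)) = true) := by
        tauto
      rw [l'] at this
      simp only [List.isEmpty_cons]
      simp only [List.all_eq_true] at this
      push Not at this
      obtain ⟨x, hx, hvx⟩ := this
      have hvow : isVowel x = true := by
        simp [isVowel]
        simp at hvx
        tauto
      symm
      rw [List.all_eq_false]
      exact ⟨x, hx, by simp [hvow]⟩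
  · exact (loop_eq_altRuns v (by omega) word.toList.length word.toList le_rfl)

theorem v_checker_changed : Claim_changed_v_checker := by
  unfold Claim_changed_v_checker
  refine ⟨by decide, by decide, by decide, ?_, by decide⟩
  show v_checker_alt (-1) "b" = true
  unfold v_checker_alt
  rw [altRuns_neg (-1) (by norm_num)]
  decide

theorem v_checker_tight : Claim_exact_v_checker := by
  intro v word _ hd
  obtain ⟨hv, hne, hall⟩ := hd
  unfold v_checker v_checker_alt
  rw [loop_neg v hv, altRuns_neg v hv]
  have h1 : word.toList.all (fun c => !isVowel c) = true := by
    simpa [isVowel] using hall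
  have h2 : word.toList.isEmpty = false := by
    cases l' : word.toList with
    | nil => exact absurd (String.toList_eq_nil_iff.mp l') hne
    | cons c t => simp
  rw [h1, h2]
  simp
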